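-- pv_equiv track=rewrite | github.com/cadusds2/tech-doc-ai | app/services/chunking.py | _linhas_com_indices
-- ===== SOURCE A (Python) =====
-- def _linhas_com_indices(texto: str) -> list[tuple[int, int, str]]:
--     linhas: list[tuple[int, int, str]] = []
--     inicio = 0
--     for linha in texto.splitlines(keepends=True):
--         fim = inicio + len(linha)
--         linhas.append((inicio, fim, linha))
--         inicio = fim
--     return linhas
-- ===== SOURCE B (Python) =====
-- def _linhas_com_indices(texto: str) -> list[tuple[int, int, str]]:
--     # Different algorithm: no splitlines, no running-offset-per-line loop.
--     # Scan the text by index once to collect the boundary positions after each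
--     # line break ('\n', '\r\n', '\r'), close the boundary list at len(texto),
--     # then slice the original text between consecutive boundaries.
--     n = len(texto)
--     bounds = [0]
--     i = 0
--     while i < n:
--         c = texto[i]
--         if c == '\n':
--             i += 1
--             bounds.append(i)
--         elif c == '\r':
--             i += 2 if i + 1 < n and texto[i + 1] == '\n' else 1
--             bounds.append(i)
--         else:
--             i += 1
--     if bounds[-1] != n:
--         bounds.append(n)
--     return [(a, b, texto[a:b]) for a, b in zip(bounds, bounds[1:])]
-- ===== Notes on version B (the rewrite author's own statement) =====
-- stated objective: alternative
-- what changed: A splits the text into lines with splitlines(keepends=True) and threads a running start offset through a per-line loop; B never calls splitlines: it scans the text by character index once to collect the boundary positions after each line break ('\n', '\r\n', '\r'), closes the boundary list at len(texto), and then reconstructs each line by slicing the original text between consecutive boundaries.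
import Mathlib
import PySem

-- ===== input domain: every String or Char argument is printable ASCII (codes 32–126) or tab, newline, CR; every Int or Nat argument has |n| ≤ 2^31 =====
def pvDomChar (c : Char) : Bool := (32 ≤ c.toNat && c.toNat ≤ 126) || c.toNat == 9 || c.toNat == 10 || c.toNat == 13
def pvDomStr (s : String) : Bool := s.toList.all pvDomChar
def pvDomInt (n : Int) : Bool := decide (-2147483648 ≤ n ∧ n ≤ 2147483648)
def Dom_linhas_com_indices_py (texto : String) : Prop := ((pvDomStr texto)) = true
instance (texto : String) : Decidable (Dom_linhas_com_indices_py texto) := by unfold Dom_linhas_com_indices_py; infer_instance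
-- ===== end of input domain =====

-- B replaces A's splitlines-plus-running-offset loop by a boundary scan: one index scan
-- collecting the break positions, then slicing the original text between consecutive
-- boundaries. Same O(n) cost, different algorithm.

-- ===== PORT A =====
-- A helper: texto.splitlines(keepends=True), exact on the ASCII domain (breaks: '\n', '\r\n', '\r')
def pySplitlinesKeep : List Char → List (List Char)
  | [] => []
  | '\n' :: rest => ['\n'] :: pySplitlinesKeep rest
  | '\r' :: '\n' :: rest => ['\r', '\n'] :: pySplitlinesKeep rest
  | '\r' :: rest => ['\r'] :: pySplitlinesKeep rest
  | c :: rest =>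
    match pySplitlinesKeep rest with
    | [] => [[c]]
    | l :: ls => (c :: l) :: ls

def linhas_com_indices_py (texto : String) : List (Int × Int × String) :=
  (((pySplitlinesKeep texto.toList).map String.ofList).foldl
    (fun (st : List (Int × Int × String) × Int) (linha : String) =>
      (st.1 ++ [(st.2, st.2 + PySem.Str.len linha, linha)], st.2 + PySem.Str.len linha)) ([], 0)).1

-- ===== PORT B =====
-- B helper: the `while i < n` scan, structural recursion on the unread suffix with index i;
-- emits the boundary position after each line break ('\n', '\r\n', '\r').
def pvScan : List Char → Int → List Int
  | [], _ => []
  | '\n' :: rest, i => (i + 1) :: pvScan rest (i + 1)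
  | '\r' :: '\n' :: rest, i => (i + 2) :: pvScan rest (i + 2)
  | '\r' :: rest, i => (i + 1) :: pvScan rest (i + 1)
  | _ :: rest, i => pvScan rest (i + 1)

def linhas_com_indices_py_alt (texto : String) : List (Int × Int × String) :=
  let n : Int := PySem.Str.len texto
  let bounds0 : List Int := 0 :: pvScan texto.toList 0
  let bounds : List Int := if bounds0.getLastD 0 = n then bounds0 else bounds0 ++ [n]
  (bounds.zip (PySem.List.slice bounds (some 1) none)).map
    (fun p => (p.1, p.2, PySem.Str.slice texto (some p.1) (some p.2)))

-- ===== PRECONDITION & SPEC =====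
def Spec_linhas_com_indices_py (texto : String) (out : List (Int × Int × String)) : Prop := out = linhas_com_indices_py_alt texto
instance (texto : String) (out : List (Int × Int × String)) : Decidable (Spec_linhas_com_indices_py texto out) := by unfold Spec_linhas_com_indices_py; infer_instance

-- ===== CLAIM (what is proved, stated in full; the proofs are below) =====
def Claim_equal_linhas_com_indices_py : Prop := ∀ (texto : String), Dom_linhas_com_indices_py texto → Spec_linhas_com_indices_py texto (linhas_com_indices_py texto)

-- ===== LEMMAS AND PROOFS =====

/-- Common characterisation: the triples built from start offset `a` over raw lines. -/
def pvBuild (a : Int) : List (List Char) → List (Int × Int × String)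
  | [] => []
  | l :: ls => (a, a + l.length, String.ofList l) :: pvBuild (a + (l.length : Int)) ls

/-- Cumulative end offsets from `a` over a list of lengths. -/
def pvSumsN (a : Nat) : List Nat → List Nat
  | [] => []
  | m :: ms => (a + m) :: pvSumsN (a + m) ms

theorem pvFoldA (L : List (List Char)) (acc : List (Int × Int × String)) (s : Int) :
    ((L.map String.ofList).foldl
      (fun (st : List (Int × Int × String) × Int) (linha : String) =>
        (st.1 ++ [(st.2, st.2 + PySem.Str.len linha, linha)], st.2 + PySem.Str.len linha)) (acc, s)).1
      = acc ++ pvBuild s L := by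
  induction L generalizing acc s with
  | nil => simp [pvBuild]
  | cons l ls ih =>
    simpa [pvBuild, PySem.Str.len] using
      ih (acc ++ [(s, s + (l.length : Int), String.ofList l)]) (s + (l.length : Int))

theorem pvFlatten (cs : List Char) : (pySplitlinesKeep cs).flatten = cs := by
  induction cs using pySplitlinesKeep.induct with
  | case1 => simp [pySplitlinesKeep]
  | case2 rest ih => simp [pySplitlinesKeep, ih]
  | case3 rest ih => simp [pySplitlinesKeep, ih]
  | case4 rest h ih =>
    have : pySplitlinesKeep ('\r' :: rest) = ['\r'] :: pySplitlinesKeep rest := by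
      match rest, h with
      | [], _ => rfl
      | c :: rs, h =>
        have : c ≠ '\n' := fun hc => h rs (by rw [hc])
        simp [pySplitlinesKeep]
    simp [this, ih]
  | case5 c rest h1 h2 h3 hP ih =>
    have : pySplitlinesKeep (c :: rest) = [[c]] := by
      simp [pySplitlinesKeep, hP]
    rw [this]
    simp [hP] at ih
    simp [ih]
  | case6 c rest h1 h2 h3 l ls hP ih =>
    have : pySplitlinesKeep (c :: rest) = (c :: l) :: ls := by
      simp [pySplitlinesKeep, hP]
    rw [this]
    rw [hP] at ih
    simpa using ih

theorem pvSplit_ne_nil (cs : List Char) (h : cs ≠ []) : pySplitlinesKeep cs ≠ [] := fun hP =>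
  h (by rw [← pvFlatten cs, hP]; rfl)

theorem pvIfCons (x t : Int) (S : List Int) (c : Prop) [Decidable c] :
    (if c then x :: S else (x :: S) ++ [t]) = x :: (if c then S else S ++ [t]) := by
  split_ifs <;> simp

/-- `getLastD`'s default is irrelevant when the closing total can be neither default. -/
theorem pvCondSwap (S : List Int) (d d' t : Int) (h : t ≠ d) (h' : t ≠ d') :
    (if S.getLastD d = t then S else S ++ [t]) = (if S.getLastD d' = t then S else S ++ [t]) := by
  cases S with
  | nil =>
    rw [show ([] : List Int).getLastD d = d from rfl, show ([] : List Int).getLastD d' = d' from rfl,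
      if_neg (fun hd => h hd.symm), if_neg (fun hd => h' hd.symm)]
  | cons x xs => simp only [List.getLastD_cons]

/-- The scan, closed off at the total length, yields exactly the cumulative line-length sums. -/
theorem pvScanEq (cs : List Char) (a : Nat) :
    (if (pvScan cs (a : Int)).getLastD (a : Int) = (a : Int) + cs.length
       then pvScan cs (a : Int) else pvScan cs (a : Int) ++ [(a : Int) + cs.length])
      = (pvSumsN a ((pySplitlinesKeep cs).map List.length)).map (fun m => (m : Int)) := by
  induction cs using pySplitlinesKeep.induct generalizing a with
  | case1 => simp [pvScan, pySplitlinesKeep, pvSumsN]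
  | case2 rest ih =>
    have ha : ((a : Int) + 1) = ((a + 1 : Nat) : Int) := by push_cast; ring
    have ht : (a : Int) + (('\n' :: rest).length : Int) = ((a + 1 : Nat) : Int) + (rest.length : Int) := by
      push_cast; simp; ring
    rw [show pvScan ('\n' :: rest) (a : Int) = ((a : Int) + 1) :: pvScan rest ((a : Int) + 1) from rfl]
    rw [List.getLastD_cons, ht, ha, pvIfCons, ih (a + 1)]
    simp [pySplitlinesKeep, pvSumsN]
  | case3 rest ih =>
    have ha : ((a : Int) + 2) = ((a + 2 : Nat) : Int) := by push_cast; ring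
    have ht : (a : Int) + (('\r' :: '\n' :: rest).length : Int) = ((a + 2 : Nat) : Int) + (rest.length : Int) := by
      push_cast; simp; ring
    rw [show pvScan ('\r' :: '\n' :: rest) (a : Int) = ((a : Int) + 2) :: pvScan rest ((a : Int) + 2) from rfl]
    rw [List.getLastD_cons, ht, ha, pvIfCons, ih (a + 2)]
    simp [pySplitlinesKeep, pvSumsN]
  | case4 rest h ih =>
    have hscan : pvScan ('\r' :: rest) (a : Int) = ((a : Int) + 1) :: pvScan rest ((a : Int) + 1) := by
      match rest, h with
      | [], _ => rfl
      | c :: rs, h =>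
        have : c ≠ '\n' := fun hc => h rs (by rw [hc])
        simp [pvScan]
    have hsplit : pySplitlinesKeep ('\r' :: rest) = ['\r'] :: pySplitlinesKeep rest := by
      match rest, h with
      | [], _ => rfl
      | c :: rs, h =>
        have : c ≠ '\n' := fun hc => h rs (by rw [hc])
        simp [pySplitlinesKeep]
    have ha : ((a : Int) + 1) = ((a + 1 : Nat) : Int) := by push_cast; ring
    have ht : (a : Int) + (('\r' :: rest).length : Int) = ((a + 1 : Nat) : Int) + (rest.length : Int) := by
      push_cast; simp; ring
    rw [hscan, List.getLastD_cons, ht, ha, pvIfCons, ih (a + 1)]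
    simp [hsplit, pvSumsN]
  | case5 c rest h1 h2 h3 hP ih =>
    -- pySplitlinesKeep rest = [] forces rest = []
    have hrest : rest = [] := by
      cases rest with
      | nil => rfl
      | cons r rs => exact absurd hP (pvSplit_ne_nil (r :: rs) (by simp))
    subst hrest
    have hsplit : pySplitlinesKeep [c] = [[c]] := by
      simp [pySplitlinesKeep]
    have hscan : pvScan [c] (a : Int) = [] := by
      simp [pvScan]
    rw [hscan, hsplit]
    simp [pvSumsN, List.getLastD]
  | case6 c rest h1 h2 h3 l ls hP ih =>
    have hscan : pvScan (c :: rest) (a : Int) = pvScan rest ((a : Int) + 1) := by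
      match rest with
      | [] => simp [pvScan]
      | r :: rs => simp [pvScan]
    have hsplit : pySplitlinesKeep (c :: rest) = (c :: l) :: ls := by
      simp [pySplitlinesKeep, hP]
    have hrest : rest ≠ [] := by
      intro h; subst h; simp [pySplitlinesKeep] at hP
    have ha : ((a : Int) + 1) = ((a + 1 : Nat) : Int) := by push_cast; ring
    have ht : (a : Int) + ((c :: rest).length : Int) = ((a + 1 : Nat) : Int) + (rest.length : Int) := by
      push_cast; simp; ring
    have hne : ((a + 1 : Nat) : Int) + (rest.length : Int) ≠ (a : Int) := by
      push_cast; omega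
    have hne' : ((a + 1 : Nat) : Int) + (rest.length : Int) ≠ ((a + 1 : Nat) : Int) := by
      have : rest.length ≠ 0 := by simpa using hrest
      push_cast; omega
    rw [hscan, ht, ha,
      pvCondSwap (pvScan rest ((a + 1 : Nat) : Int)) _ ((a + 1 : Nat) : Int) _ hne hne',
      ih (a + 1), hsplit]
    -- shift the first length by one: (c::l).length = l.length + 1
    rw [hP] at *
    simp [pvSumsN]
    constructor
    · ring
    · have : a + (l.length + 1) = a + 1 + l.length := by omega
      rw [List.map_cons] at *
      simp [this]

theorem pvSlices (L : List (List Char)) (F : List Char) (a : Nat) (h : F.drop a = L.flatten) :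
    ((((a : Int) :: (pvSumsN a (L.map List.length)).map (fun m => (m : Int))).zip
        ((pvSumsN a (L.map List.length)).map (fun m => (m : Int)))).map
      (fun p => (p.1, p.2, String.ofList (PySem.Chars.slice F (some p.1) (some p.2)))))
      = pvBuild (a : Int) L := by
  induction L generalizing a F with
  | nil => simp [pvSumsN, pvBuild]
  | cons l ls ih =>
    have hflat : F.drop a = l ++ ls.flatten := by simpa using h
    have hslice : PySem.Chars.slice F (some (a : Int)) (some ((a + l.length : Nat) : Int)) = l := by
      have : ((a + l.length : Nat) : Int) = (a : Int) + (l.length : Int) := by push_cast; ring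
      rw [PySem.Chars.slice, this, PySem.List.slice_natCast_add, hflat, List.take_left]
    have hdrop : F.drop (a + l.length) = ls.flatten := by
      rw [← List.drop_drop, hflat, List.drop_left]
    rw [show pvSumsN a ((l :: ls).map List.length)
        = (a + l.length) :: pvSumsN (a + l.length) (ls.map List.length) from rfl]
    have hcast : ((a + l.length : Nat) : Int) = (a : Int) + (l.length : Int) := by push_cast; ring
    simp only [pvBuild]
    rw [← hcast]
    refine congrArg₂ List.cons ?_ ?_
    · simp only [hslice]
    · exact ih F (a + l.length) hdrop

-- ===== VERDICT (by name: the statement is the Claim_ definition above) =====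
theorem linhas_com_indices_py_spec : Claim_equal_linhas_com_indices_py := by
  intro texto _
  unfold Spec_linhas_com_indices_py linhas_com_indices_py
  rw [pvFoldA, List.nil_append]
  simp only [linhas_com_indices_py_alt, PySem.Str.len_eq, PySem.List.slice_from_one,
    List.getLastD_cons, pvIfCons, List.tail_cons, PySem.Str.slice]
  have hscan := pvScanEq texto.toList 0
  simp only [Nat.cast_zero, Int.zero_add] at hscan
  rw [hscan]
  have hsl := pvSlices (pySplitlinesKeep texto.toList) texto.toList 0
    (by simpa using (pvFlatten texto.toList).symm)
  simp only [Nat.cast_zero] at hsl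
  rw [← hsl]
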